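-- pv_equiv track=rewrite | github.com/arikansm/cti-for-css | Source Code/cti-for-css/cti_manager/builder.py | __get_specific_metadata
-- ===== SOURCE A (Python) =====
-- def __get_specific_metadata(info_file_content_processed: list[list[str]], key) -> str:
--     for line_info in info_file_content_processed:
--         try:
--             if line_info[0] == key:
--                 return line_info[1]
--         except:
--             continue
--
--     return ""
-- ===== SOURCE B (Python) =====
-- def __get_specific_metadata(info_file_content_processed: list[list[str]], key) -> str:
--     table = {}
--     for row in info_file_content_processed:
--         if len(row) >= 2 and row[0] not in table:
--             table[row[0]] = row[1]
--     return table.get(key, "")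
-- ===== Notes on version B (the rewrite author's own statement) =====
-- stated objective: alternative
-- what changed: Replaces the early-returning linear search (with try/except to skip short rows) by a single index-building pass that keeps the first value per key in a dict, followed by one lookup.
import Mathlib
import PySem

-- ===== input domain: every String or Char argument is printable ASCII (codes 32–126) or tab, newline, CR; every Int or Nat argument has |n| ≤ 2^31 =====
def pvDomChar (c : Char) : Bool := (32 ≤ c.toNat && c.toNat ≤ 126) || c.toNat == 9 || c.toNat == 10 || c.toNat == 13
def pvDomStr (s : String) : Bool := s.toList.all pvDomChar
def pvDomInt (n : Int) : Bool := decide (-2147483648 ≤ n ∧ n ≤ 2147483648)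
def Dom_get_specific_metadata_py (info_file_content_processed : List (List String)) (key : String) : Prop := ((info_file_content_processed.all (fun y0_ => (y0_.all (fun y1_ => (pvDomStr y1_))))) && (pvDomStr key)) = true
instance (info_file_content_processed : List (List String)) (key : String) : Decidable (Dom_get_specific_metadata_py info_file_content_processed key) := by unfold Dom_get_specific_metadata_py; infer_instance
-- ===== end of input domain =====

-- B builds a first-occurrence index dict in one pass and looks the key up once,
-- instead of A's early-returning scan with a try/except that skips too-short rows. (objective: alternative)

-- ===== PORT A =====
-- literal port: line_info[0]/line_info[1] via pyGet?; 'none' is the IndexError,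
-- which A's bare 'except: continue' turns into moving to the next row.
def get_specific_metadata_py (info_file_content_processed : List (List String)) (key : String) : String :=
  match info_file_content_processed with
  | [] => ""
  | line_info :: rest =>
    match PySem.List.pyGet? line_info 0 with
    | none => get_specific_metadata_py rest key
    | some v0 =>
      if v0 = key then
        match PySem.List.pyGet? line_info 1 with
        | some v1 => v1
        | none => get_specific_metadata_py rest key
      else get_specific_metadata_py rest key

-- ===== PORT B =====
-- exact for Source B's guard: 'len(row) >= 2 and row[0] not in table' is the match on a :: b :: _
def get_specific_metadata_py_alt (info_file_content_processed : List (List String)) (key : String) : String :=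
  let table := info_file_content_processed.foldl
    (fun d row =>
      match row with
      | a :: b :: _ => if d.contains a then d else d.insert a b
      | _ => d)
    PySem.Dict.empty
  table.getD key ""

-- ===== PRECONDITION & SPEC =====
def Spec_get_specific_metadata_py (info_file_content_processed : List (List String)) (key : String) (out : String) : Prop := out = get_specific_metadata_py_alt info_file_content_processed key
instance (info_file_content_processed : List (List String)) (key : String) (out : String) : Decidable (Spec_get_specific_metadata_py info_file_content_processed key out) := by unfold Spec_get_specific_metadata_py; infer_instance

-- ===== CLAIM (what is proved, stated in full; the proofs are below) =====
def Claim_equal_get_specific_metadata_py : Prop := ∀ (info_file_content_processed : List (List String)) (key : String), Dom_get_specific_metadata_py info_file_content_processed key → Spec_get_specific_metadata_py info_file_content_processed key (get_specific_metadata_py info_file_content_processed key)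

-- ===== LEMMAS AND PROOFS =====

-- the fold step of B's port, named for the invariant lemma
def pvStep (d : PySem.Dict String String) (row : List String) : PySem.Dict String String :=
  match row with
  | a :: b :: _ => if d.contains a then d else d.insert a b
  | _ => d

-- invariant: looking the key up in the dict built over 'rows' from 'd' gives the
-- value already indexed in 'd' if any, and otherwise A's scan of 'rows'.
theorem pvFold_getD (rows : List (List String)) (d : PySem.Dict String String) (key : String) :
    (rows.foldl pvStep d).getD key "" =
      if d.contains key then d.getD key "" else get_specific_metadata_py rows key := by
  induction rows generalizing d with
  | nil =>
    simp only [List.foldl_nil, get_specific_metadata_py]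
    by_cases hk : d.contains key
    · rw [if_pos hk]
    · rw [if_neg hk, PySem.Dict.getD_of_not_contains]
      simpa using hk
  | cons row rest ih =>
    match row with
    | [] =>
      simp only [List.foldl_cons, pvStep]
      rw [ih]
      simp [get_specific_metadata_py, PySem.List.pyGet?, PySem.List.pyIdx?]
    | [a] =>
      simp only [List.foldl_cons, pvStep]
      rw [ih]
      by_cases hak : a = key
      · subst hak
        simp [get_specific_metadata_py, PySem.List.pyGet?, PySem.List.pyIdx?]
      · simp [get_specific_metadata_py, PySem.List.pyGet?, PySem.List.pyIdx?, hak]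
    | a :: b :: t =>
      have hpos : (0:Int) ≤ (t.length:Int) + 1 := by positivity
      simp only [List.foldl_cons, pvStep]
      by_cases hc : d.contains a
      · rw [if_pos hc, ih]
        by_cases hak : a = key
        · subst hak
          simp [hc]
        · simp [get_specific_metadata_py, PySem.List.pyGet?, PySem.List.pyIdx?, hak, hpos]
      · rw [if_neg hc, ih]
        by_cases hak : a = key
        · subst hak
          have h1 : (d.insert a b).contains a := PySem.Dict.contains_insert_self d a b
          rw [if_pos h1]
          have hc' : d.contains a = false := by simpa using hc
          simp [PySem.Dict.getD_insert_self, hc', get_specific_metadata_py,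
            PySem.List.pyGet?, PySem.List.pyIdx?, hpos]
        · have hne : key ≠ a := fun h => hak h.symm
          rw [PySem.Dict.contains_insert]
          have hb : (key == a) = false := by simp [hne]
          rw [hb]
          simp only [Bool.false_or]
          rw [PySem.Dict.getD_insert]
          rw [if_neg hne]
          simp [get_specific_metadata_py, PySem.List.pyGet?, PySem.List.pyIdx?, hak, hpos]

-- ===== VERDICT (by name: the statement is the Claim_ definition above) =====
theorem get_specific_metadata_py_spec : Claim_equal_get_specific_metadata_py := by
  intro l key _
  show get_specific_metadata_py l key = get_specific_metadata_py_alt l key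
  unfold get_specific_metadata_py_alt
  have h : (l.foldl (fun d row =>
      match row with
      | a :: b :: _ => if d.contains a then d else d.insert a b
      | _ => d) PySem.Dict.empty) = l.foldl pvStep PySem.Dict.empty := rfl
  rw [h, pvFold_getD]
  simp
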